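-- pv_equiv track=rewrite | github.com/ahmedloona/alpha | appacademy-online-enumerable-exercises-c9c21b3ea398/lib/enumerables2.py | no_repeats
-- ===== SOURCE A (Python) =====
-- def no_repeats(song_name, songs):
--     for idx, song in enumerate(songs):
--         if not song == song_name:
--             continue
--         else:
--             if songs[idx:idx+2] == [song_name, song_name]:
--                 return False
--     return True
-- ===== SOURCE B (Python) =====
-- def no_repeats(song_name, songs):
--     positions = [i for i, s in enumerate(songs) if s == song_name]
--     return all(b - a != 1 for a, b in zip(positions, positions[1:]))
-- ===== Notes on version B (the rewrite author's own statement) =====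
-- stated objective: alternative
-- what changed: B first materializes the list of indices where song_name occurs, then checks that no two successive collected indices differ by exactly 1, instead of A's single scan with a two-element look-ahead slice at each match.
import Mathlib
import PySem

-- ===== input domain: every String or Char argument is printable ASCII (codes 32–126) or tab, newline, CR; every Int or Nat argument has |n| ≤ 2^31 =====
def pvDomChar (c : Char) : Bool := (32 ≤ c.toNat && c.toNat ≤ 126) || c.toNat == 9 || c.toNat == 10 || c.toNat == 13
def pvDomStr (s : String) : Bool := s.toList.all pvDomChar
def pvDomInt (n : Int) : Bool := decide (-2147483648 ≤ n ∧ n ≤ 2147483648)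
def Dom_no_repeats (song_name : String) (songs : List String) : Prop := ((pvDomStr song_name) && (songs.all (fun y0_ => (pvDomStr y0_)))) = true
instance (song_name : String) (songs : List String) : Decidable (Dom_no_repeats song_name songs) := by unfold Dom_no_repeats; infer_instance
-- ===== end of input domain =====

-- B materializes the list of indices at which song_name occurs, then checks successive
-- index gaps, instead of A's single scan with a two-element look-ahead slice (alternative decomposition).


-- ===== PORT A =====
-- the for-loop over enumerate(songs): continue on non-matches, return False when the
-- two-element slice at the match equals [song_name, song_name]
def noRepLoopA (song_name : String) (songs : List String) : List (Int × String) → Bool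
  | [] => true
  | (idx, song) :: rest =>
    if !(song == song_name) then noRepLoopA song_name songs rest
    else if PySem.List.slice songs (some idx) (some (idx + 2)) == [song_name, song_name] then
      false
    else noRepLoopA song_name songs rest

def no_repeats (song_name : String) (songs : List String) : Bool :=
  noRepLoopA song_name songs (PySem.List.enumerate songs)

-- ===== PORT B =====
def no_repeats_alt (song_name : String) (songs : List String) : Bool :=
  let positions := ((PySem.List.enumerate songs).filter (fun p => p.2 == song_name)).map (fun p => p.1)
  (positions.zip positions.tail).all (fun p => p.2 - p.1 != 1)

-- ===== PRECONDITION & SPEC =====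
def Spec_no_repeats (song_name : String) (songs : List String) (out : Bool) : Prop := out = no_repeats_alt song_name songs
instance (song_name : String) (songs : List String) (out : Bool) : Decidable (Spec_no_repeats song_name songs out) := by unfold Spec_no_repeats; infer_instance

-- ===== CLAIM (what is proved, stated in full; the proofs are below) =====
def Claim_equal_no_repeats : Prop := ∀ (song_name : String) (songs : List String), Dom_no_repeats song_name songs → Spec_no_repeats song_name songs (no_repeats song_name songs)

-- ===== LEMMAS AND PROOFS =====

-- common reference point: "no two consecutive occurrences of n"
def consec (n : String) : List String → Bool
  | a :: b :: rest => !(a == n && b == n) && consec n (b :: rest)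
  | _ => true

-- B's two pieces, named for the proofs
def posOf (n : String) (tail : List String) (k : Int) : List Int :=
  ((PySem.List.enumerate tail k).filter (fun p => p.2 == n)).map (fun p => p.1)

def chk (ps : List Int) : Bool := (ps.zip ps.tail).all (fun p => p.2 - p.1 != 1)

theorem posOf_cons (n a : String) (rest : List String) (k : Int) :
    posOf n (a :: rest) k = if a == n then k :: posOf n rest (k + 1) else posOf n rest (k + 1) := by
  by_cases h : a = n <;> simp [posOf, PySem.List.enumerate, h]

theorem posOf_ge (n : String) (tail : List String) :
    ∀ (k p : Int), p ∈ posOf n tail k → k ≤ p := by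
  induction tail with
  | nil => intro k p hp; simp [posOf, PySem.List.enumerate] at hp
  | cons a rest ih =>
    intro k p hp
    rw [posOf_cons] at hp
    by_cases h : a = n
    · simp [h] at hp
      rcases hp with rfl | hp
      · omega
      · have := ih (k + 1) p hp; omega
    · simp [h] at hp
      have := ih (k + 1) p hp; omega

theorem chk_cons_cons (x y : Int) (t : List Int) :
    chk (x :: y :: t) = ((y - x != 1) && chk (y :: t)) := by
  simp [chk]

theorem consec_cons2 (n a b : String) (rest : List String) :
    consec n (a :: b :: rest) = (!(a == n && b == n) && consec n (b :: rest)) := rfl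

theorem enum_cons {α : Type} (a : α) (t : List α) (s : Int) :
    PySem.List.enumerate (a :: t) s = (s, a) :: PySem.List.enumerate t (s + 1) := by
  simp [PySem.List.enumerate]

theorem B_eq_consec (n : String) (tail : List String) :
    ∀ k : Int, chk (posOf n tail k) = consec n tail := by
  induction tail with
  | nil => intro k; simp [posOf, PySem.List.enumerate, chk, consec]
  | cons a rest ih =>
    intro k
    rw [posOf_cons]
    cases rest with
    | nil =>
      by_cases ha : a = n
      · rw [if_pos (by simp [ha])]; simp [posOf, PySem.List.enumerate, chk, consec]
      · rw [if_neg (by simp [ha])]; simp [posOf, PySem.List.enumerate, chk, consec]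
    | cons b rest' =>
      by_cases ha : a = n
      · rw [if_pos (by simp [ha]), posOf_cons]
        by_cases hb : b = n
        · rw [if_pos (by simp [hb]), chk_cons_cons, consec_cons2]
          simp [ha, hb]
        · rw [if_neg (by simp [hb])]
          have hrest := ih (k + 1)
          rw [posOf_cons, if_neg (by simp [hb])] at hrest
          cases hps : posOf n rest' (k + 1 + 1) with
          | nil =>
            rw [hps] at hrest
            rw [consec_cons2, ← hrest]
            simp [chk, hb]
          | cons p ps =>
            have hp : (k + 1 + 1 : Int) ≤ p :=
              posOf_ge n rest' (k + 1 + 1) p (by rw [hps]; exact List.mem_cons_self ..)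
            rw [hps] at hrest
            rw [chk_cons_cons]
            have hgap : (p - k != 1) = true := by
              simp only [bne_iff_ne, ne_eq]; omega
            rw [hgap, Bool.true_and, hrest, consec_cons2]
            simp [hb]
      · rw [if_neg (by simp [ha]), ih (k + 1), consec_cons2]
        simp [ha]

theorem A_eq_consec (n : String) (songs : List String) :
    ∀ (tail : List String) (k : Nat), songs.drop k = tail →
      noRepLoopA n songs (PySem.List.enumerate tail (k : Int)) = consec n tail := by
  intro tail
  induction tail with
  | nil => intro k h; simp [PySem.List.enumerate, noRepLoopA, consec]
  | cons a rest ih =>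
    intro k h
    have hdrop : songs.drop (k + 1) = rest := by
      have ht : (songs.drop k).tail = (a :: rest).tail := by rw [h]
      simpa [List.tail_drop] using ht
    have hslice : PySem.List.slice songs (some (k : Int)) (some ((k : Int) + 2)) = (a :: rest).take 2 := by
      have h2 : ((k : Int) + 2) = ((k + 2 : Nat) : Int) := by push_cast; ring
      rw [h2, PySem.List.slice_natCast, h]
      congr 1
      omega
    have hrec : noRepLoopA n songs (PySem.List.enumerate rest ((k : Int) + 1)) = consec n rest := by
      have h1 : ((k : Int) + 1) = ((k + 1 : Nat) : Int) := by push_cast; ring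
      rw [h1]; exact ih (k + 1) hdrop
    rw [enum_cons]
    by_cases ha : a = n
    · rw [show noRepLoopA n songs (((k : Int), a) :: PySem.List.enumerate rest ((k : Int) + 1)) =
        (if PySem.List.slice songs (some (k : Int)) (some ((k : Int) + 2)) == [n, n] then false
         else noRepLoopA n songs (PySem.List.enumerate rest ((k : Int) + 1))) from by
          simp [noRepLoopA, ha]]
      rw [hslice]
      cases rest with
      | nil => simp [consec, noRepLoopA, PySem.List.enumerate]
      | cons b rest' =>
        by_cases hb : b = n
        · rw [consec_cons2]; simp [ha, hb]
        · rw [consec_cons2]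
          rw [if_neg (show ¬((((a :: b :: rest').take 2) == [n, n]) = true) from by simp [hb])]
          rw [hrec]
          simp [hb]
    · rw [show noRepLoopA n songs (((k : Int), a) :: PySem.List.enumerate rest ((k : Int) + 1)) =
        noRepLoopA n songs (PySem.List.enumerate rest ((k : Int) + 1)) from by
          simp [noRepLoopA, ha]]
      rw [hrec]
      cases rest with
      | nil => simp [consec]
      | cons b rest' => rw [consec_cons2]; simp [ha]

-- ===== VERDICT (by name: the statement is the Claim_ definition above) =====
theorem no_repeats_spec : Claim_equal_no_repeats := by
  intro n songs _
  unfold Spec_no_repeats no_repeats no_repeats_alt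
  have hA : noRepLoopA n songs (PySem.List.enumerate songs ((0 : Nat) : Int)) = consec n songs :=
    A_eq_consec n songs songs 0 (by simp)
  have hB : chk (posOf n songs 0) = consec n songs := B_eq_consec n songs 0
  simp only [Nat.cast_zero] at hA
  rw [hA]
  simpa [posOf, chk] using hB.symm
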